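-- pv_equiv track=rewrite | github.com/devocean-han/Algorithm-Practice | week_5/03_problem_correct_parenthesis.py | get_correct_parentheses2
-- ===== SOURCE A (Python) =====
-- def is_correct_parenthesis(string):
--     stack = []
--     for parenthesis in string:
--         if parenthesis == '(':
--             stack.append(parenthesis)
--         else:
--             # ')'가 나왔는데 이미 남은 '('가 하나도 없는 상태인 경우, 틀렸음
--             if len(stack) == 0:
--                 return False;
--             stack.pop()
--     # 끝까지 진행했는데 '('가 아직 남아있어도 틀렸음
--     return len(stack) == 0
--
-- def is_balanced_parenthesis(string):
--     return string.count('(') == string.count(')')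
--
-- def get_separated_balanced_parenthesis(string):
--     for i in range(1, len(string) + 1): # i=0부터 갈 경우 첫 판에 u = [:0] = ''이 되어 '균형잡혔다'고 통과되어버린다. => 무한루프행
--         # 매번 i=1부터 검사하게 하면 '()'같이 2개 이하의 문자열이 들어왔을 때 i=1~1, 즉 '()'[:1]만 검사하고 끝내게 된다.
--         # 그러면 결국 '()'[0]과 같으므로 마지막 2개 이하 문자는 절대로 is_balanced_p..()를 통과할 수 없다.
--         # i를 1부터 문자길이+2까지 검사하게 해야 한다. 그래야 range에서 하나 잘리고 슬라이스에서 하나 잘려서 끝까지 검사할 수 있다.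
--         # => range(1, len(받은문자열) + 2)) : '()'가 들어오면 i=1,2,3을 돌게 되고, 슬라이싱에 들어가
--         #   '()'[:1]과 '()'[:2], '()'[:3], 즉 '('과 '()'를 검사하게 된다. 엥? i=3은 없어도 되네.
--         # 최종: range(1, len(받은문자열) + 1)
--         if is_balanced_parenthesis(string[:i]):
--             u = string[:i]
--             v = string[i:]
--             return u, v
--
-- def flip_parenthesis(string):
--     result = ''
--     for parenthesis in string:
--         if parenthesis == '(':
--             result += ')'
--         else:
--             result += '('
--     return result
--
-- def get_correct_parentheses2(balanced_parenthesis_string):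
--     # (내가 추가:) 만약 주어진 문자열이 '균형잡힌' 문자열이 아니라면, '균형잡히지 않음' 표시로 None 반환
--     if not is_balanced_parenthesis(balanced_parenthesis_string):
--         return None
--     # 오 만약 주어진 문자열이 '올바른' 문자열이라면, 곧바로 반환
--     if is_correct_parenthesis(balanced_parenthesis_string):
--         return balanced_parenthesis_string
--
--     # 반환 지점 1: 탈출 조건. u=''가 된 경우.
--     if len(balanced_parenthesis_string) == 0:
--         return ''
--
--     u, v = get_separated_balanced_parenthesis(balanced_parenthesis_string)
--
--     # 반환 지점 2: u가 (빈 문자열이 아니고) 이미 올바른 경우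
--     if is_correct_parenthesis(u):
--         return u + get_correct_parentheses2(v)
--
--     # 반환 지점 3: u가 (빈 문자열이 아니고) 올바르지 않은 경우
--     # else를 해주지 않아도 같은 결과가 될까..? => 같다.
--     # else:
--     return '(' + get_correct_parentheses2(v) + ')' + flip_parenthesis(u[1:-1])
-- ===== SOURCE B (Python) =====
-- def get_correct_parentheses2(balanced_parenthesis_string):
--     s = balanced_parenthesis_string
--     if s.count('(') != s.count(')'):
--         return None
--     pre = []   # pieces of the answer, left to right
--     suf = []   # pieces to append at the very end, in reverse order
--     while s:
--         # one pass: find the shortest balanced prefix (running paren net),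
--         # tracking at the same time whether that prefix is already "correct"
--         # ('(' counts +1, every other character -1, never negative, ends at 0).
--         net = 0
--         depth = 0
--         ok = True
--         i = 0
--         for ch in s:
--             i += 1
--             if ch == '(':
--                 net += 1
--                 depth += 1
--             else:
--                 if ch == ')':
--                     net -= 1
--                 depth -= 1
--                 if depth < 0:
--                     ok = False
--             if net == 0:
--                 break
--         u, v = s[:i], s[i:]
--         if ok and depth == 0:
--             pre.append(u)
--         else:
--             pre.append('(')
--             suf.append(')' + ''.join(')' if c == '(' else '(' for c in u[1:-1]))
--         s = v
--     return ''.join(pre) + ''.join(reversed(suf))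
-- ===== Notes on version B (the rewrite author's own statement) =====
-- stated objective: faster
-- what changed: A recounts every prefix with string.count inside a linear scan and recurses per split with stack-based correctness re-checks; B finds each split and its correctness flag in one running-balance pass and assembles the result iteratively with prefix/suffix accumulators.
import Mathlib
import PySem

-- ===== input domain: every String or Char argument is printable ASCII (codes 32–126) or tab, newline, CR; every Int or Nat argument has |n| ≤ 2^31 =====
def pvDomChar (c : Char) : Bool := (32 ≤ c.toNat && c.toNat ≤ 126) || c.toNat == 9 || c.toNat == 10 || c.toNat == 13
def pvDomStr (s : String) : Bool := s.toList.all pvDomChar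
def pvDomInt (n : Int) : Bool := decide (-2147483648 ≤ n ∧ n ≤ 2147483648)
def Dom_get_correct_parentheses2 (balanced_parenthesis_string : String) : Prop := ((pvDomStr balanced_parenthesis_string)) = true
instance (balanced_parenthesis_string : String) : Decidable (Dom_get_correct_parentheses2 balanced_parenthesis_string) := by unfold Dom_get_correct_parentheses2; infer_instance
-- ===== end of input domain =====

-- B replaces A's per-prefix recounting, stack-based correctness checks and recursion
-- by a single pass per split (running balance + depth) inside an iterative loop with
-- prefix/suffix accumulators (objective: faster).

-- ===== PORT A =====
-- is_correct_parenthesis: explicit stack; .append = ++ [c], .pop() = dropLast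
def pvIcAux : List Char → List Char → Bool
  | [], stack => stack.length == 0
  | c :: rest, stack =>
    if c = '(' then pvIcAux rest (stack ++ [c])
    else if stack.length == 0 then false
    else pvIcAux rest stack.dropLast

def pvIcA (cs : List Char) : Bool := pvIcAux cs []

-- is_balanced_parenthesis: string.count of a single character = List.count
def pvBal (cs : List Char) : Bool := cs.count '(' == cs.count ')'

-- get_separated_balanced_parenthesis: loop i = 1 .. len testing string[:i] (= take i, i ≥ 0)
def pvSepAux (cs : List Char) (i : Nat) : Option Nat :=
  if cs.length + 1 ≤ i then none
  else if pvBal (cs.take i) then some i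
  else pvSepAux cs (i + 1)
termination_by cs.length + 1 - i
decreasing_by omega

-- needed by pvGcpA's termination argument
theorem pvSepAux_ge (cs : List Char) (k : Nat) :
    ∀ i, pvSepAux cs k = some i → k ≤ i ∧ i ≤ cs.length := by
  fun_induction pvSepAux cs k with
  | case1 => intro i h; simp at h
  | case2 => intro i h; simp only [Option.some.injEq] at h; omega
  | case3 => intro i h; rename_i ih; have := ih i h; omega

-- flip_parenthesis: builds the result character by character
def pvFlipA : List Char → List Char
  | [] => []
  | c :: rest => (if c = '(' then ')' else '(') :: pvFlipA rest

def pvGcpA (cs : List Char) : Option (List Char) :=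
  if !pvBal cs then none
  else if pvIcA cs then some cs
  else if hlen : cs.length = 0 then some []
  else
    match hsep : pvSepAux cs 1 with
    | none => none   -- Python would raise TypeError unpacking None; unreachable for balanced input
    | some i =>
      let u := cs.take i
      let v := cs.drop i
      if pvIcA u then (pvGcpA v).map (fun r => u ++ r)
      else (pvGcpA v).map (fun r => '(' :: r ++ ')' :: pvFlipA ((u.drop 1).dropLast))
termination_by cs.length
decreasing_by
  all_goals
    have h := pvSepAux_ge cs 1 i hsep
    simp only [List.length_drop]
    omega

def get_correct_parentheses2 (balanced_parenthesis_string : String) : Option String :=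
  (pvGcpA balanced_parenthesis_string.toList).map (fun l => String.mk l)

-- ===== PORT B =====
-- the inner for-loop of Source B: one pass, running paren net (split) + depth/ok (correctness)
def pvScanB : List Char → Int → Int → Bool → Nat → Nat × Int × Bool
  | [], _net, c, ok, i => (i, c, ok)
  | ch :: rest, net, c, ok, i =>
    let i' := i + 1
    if ch = '(' then
      let net' := net + 1
      let c' := c + 1
      if net' = 0 then (i', c', ok) else pvScanB rest net' c' ok i'
    else
      let net' := if ch = ')' then net - 1 else net
      let c' := c - 1
      let ok' := if c' < 0 then false else ok
      if net' = 0 then (i', c', ok') else pvScanB rest net' c' ok' i'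

-- needed by pvGcpBloop's termination argument
theorem pvScanB_fst_ge : ∀ (cs : List Char) (net c : Int) (ok : Bool) (i : Nat),
    i ≤ (pvScanB cs net c ok i).1 := by
  intro cs
  induction cs with
  | nil => intro _ _ _ _; simp [pvScanB]
  | cons ch rest ih =>
    intro net c ok i
    simp only [pvScanB]
    repeat' split
    all_goals first
      | exact Nat.le_succ i
      | exact Nat.le_trans (Nat.le_succ i) (ih _ _ _ (i + 1))

theorem pvScanB_fst_pos (ch : Char) (rest : List Char) (net c : Int) (ok : Bool) (i : Nat) :
    i + 1 ≤ (pvScanB (ch :: rest) net c ok i).1 := by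
  simp only [pvScanB]
  repeat' split
  all_goals first
    | exact Nat.le_refl (i + 1)
    | exact pvScanB_fst_ge _ _ _ _ (i + 1)

-- the while-loop of Source B: pre = pieces left-to-right, suf joined reversed at the end
def pvGcpBloop : List Char → List Char → List (List Char) → List Char
  | [], pre, suf => pre ++ suf.reverse.flatten
  | ch :: rest, pre, suf =>
    let r := pvScanB (ch :: rest) 0 0 true 0
    let u := (ch :: rest).take r.1
    let v := (ch :: rest).drop r.1
    if r.2.2 && r.2.1 == 0 then pvGcpBloop v (pre ++ u) suf
    else pvGcpBloop v (pre ++ ['('])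
        (suf ++ [')' :: ((u.drop 1).dropLast).map (fun c => if c = '(' then ')' else '(')])
termination_by s _ _ => s.length
decreasing_by
  all_goals
    have := pvScanB_fst_pos ch rest 0 0 true 0
    simp only [List.length_drop]
    simp only [List.length_cons] at *
    omega

def get_correct_parentheses2_alt (balanced_parenthesis_string : String) : Option String :=
  if balanced_parenthesis_string.toList.count '(' == balanced_parenthesis_string.toList.count ')' then
    some (String.mk (pvGcpBloop balanced_parenthesis_string.toList [] []))
  else none

-- ===== PRECONDITION & SPEC =====
def Spec_get_correct_parentheses2 (balanced_parenthesis_string : String) (out : Option String) : Prop := out = get_correct_parentheses2_alt balanced_parenthesis_string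
instance (balanced_parenthesis_string : String) (out : Option String) : Decidable (Spec_get_correct_parentheses2 balanced_parenthesis_string out) := by unfold Spec_get_correct_parentheses2; infer_instance

-- ===== CLAIM (what is proved, stated in full; the proofs are below) =====
def Claim_equal_get_correct_parentheses2 : Prop := ∀ (balanced_parenthesis_string : String), Dom_get_correct_parentheses2 balanced_parenthesis_string → Spec_get_correct_parentheses2 balanced_parenthesis_string (get_correct_parentheses2 balanced_parenthesis_string)

-- ===== LEMMAS AND PROOFS =====

-- proof-side specification functions: paren net, correctness counter, never-negative flag, split index
def pvPstep (ch : Char) : Int := if ch = '(' then 1 else if ch = ')' then -1 else 0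
def pvCstep (ch : Char) : Int := if ch = '(' then 1 else -1
def pvPnet : List Char → Int
  | [] => 0
  | ch :: t => pvPstep ch + pvPnet t
def pvCcnt : List Char → Int
  | [] => 0
  | ch :: t => pvCstep ch + pvCcnt t
def pvOkFrom : Int → List Char → Bool
  | _, [] => true
  | c, ch :: rest => if ch = '(' then pvOkFrom (c + 1) rest
                     else (decide (0 ≤ c - 1)) && pvOkFrom (c - 1) rest
def pvSplitIdx : List Char → Int → Nat
  | [], _ => 0
  | ch :: rest, net =>
    if net + pvPstep ch = 0 then 1 else 1 + pvSplitIdx rest (net + pvPstep ch)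

theorem pvPnet_append (a b : List Char) : pvPnet (a ++ b) = pvPnet a + pvPnet b := by
  induction a with
  | nil => simp [pvPnet]
  | cons ch t ih => simp only [List.cons_append, pvPnet, ih]; ring

theorem pvCcnt_append (a b : List Char) : pvCcnt (a ++ b) = pvCcnt a + pvCcnt b := by
  induction a with
  | nil => simp [pvCcnt]
  | cons ch t ih => simp only [List.cons_append, pvCcnt, ih]; ring

theorem pvOkFrom_append (a b : List Char) : ∀ c : Int,
    pvOkFrom c (a ++ b) = (pvOkFrom c a && pvOkFrom (c + pvCcnt a) b) := by
  induction a with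
  | nil => intro c; simp [pvOkFrom, pvCcnt]
  | cons ch t ih =>
    intro c
    simp only [List.cons_append, pvOkFrom, pvCcnt, pvCstep]
    split
    · rw [ih]
      have : c + (1 + pvCcnt t) = c + 1 + pvCcnt t := by ring
      rw [this]
    · rw [ih]
      have : c + (-1 + pvCcnt t) = c - 1 + pvCcnt t := by ring
      rw [this, Bool.and_assoc]

theorem pvPnet_eq_counts (cs : List Char) :
    pvPnet cs = (cs.count '(' : Int) - (cs.count ')' : Int) := by
  induction cs with
  | nil => simp [pvPnet]
  | cons ch t ih =>
    simp only [pvPnet, pvPstep, List.count_cons, ih]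
    by_cases h1 : ch = '(' <;> by_cases h2 : ch = ')' <;> simp_all <;> push_cast <;> ring

theorem pvBal_iff (cs : List Char) : pvBal cs = true ↔ pvPnet cs = 0 := by
  rw [pvBal, pvPnet_eq_counts, beq_iff_eq]
  omega

theorem pvIcAux_eq (cs : List Char) : ∀ (stack : List Char),
    pvIcAux cs stack = (pvOkFrom (stack.length : Int) cs && ((stack.length : Int) + pvCcnt cs == 0)) := by
  induction cs with
  | nil => intro stack; simp [pvIcAux, pvOkFrom, pvCcnt]
  | cons ch rest ih =>
    intro stack
    simp only [pvIcAux, pvOkFrom, pvCcnt, pvCstep]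
    split
    · rw [ih (stack ++ [ch])]
      have h1 : ((stack ++ [ch]).length : Int) = (stack.length : Int) + 1 := by
        simp
      rw [h1]
      have h2 : (stack.length : Int) + (1 + pvCcnt rest) = (stack.length : Int) + 1 + pvCcnt rest := by ring
      rw [h2]
    · by_cases h0 : stack.length = 0
      · have hd : ¬ (0 ≤ (stack.length : Int) - 1) := by omega
        simp [h0, hd]
      · have hlen : 1 ≤ stack.length := by omega
        rw [if_neg (by simpa using h0)]
        rw [ih stack.dropLast]
        have hd : (stack.dropLast.length : Int) = (stack.length : Int) - 1 := by
          rw [List.length_dropLast]; omega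
        rw [hd]
        have hge : (0 ≤ (stack.length : Int) - 1) := by omega
        simp only [hge, decide_true, Bool.true_and]
        have : (stack.length : Int) - 1 + pvCcnt rest = (stack.length : Int) + (-1 + pvCcnt rest) := by ring
        rw [this]

theorem pvIcA_eq (cs : List Char) :
    pvIcA cs = (pvOkFrom 0 cs && pvCcnt cs == 0) := by
  have h := pvIcAux_eq cs []
  simpa [pvIcA] using h

theorem pvSplitIdx_le (cs : List Char) : ∀ net, pvSplitIdx cs net ≤ cs.length := by
  induction cs with
  | nil => intro net; simp [pvSplitIdx]
  | cons ch rest ih =>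
    intro net
    simp only [pvSplitIdx, List.length_cons]
    split
    · omega
    · have := ih (net + pvPstep ch); omega

theorem pvSplitIdx_pos (ch : Char) (rest : List Char) (net : Int) :
    1 ≤ pvSplitIdx (ch :: rest) net := by
  simp only [pvSplitIdx]; split <;> omega

theorem pvSplitIdx_hit (cs : List Char) : ∀ net, net + pvPnet cs = 0 → cs ≠ [] →
    net + pvPnet (cs.take (pvSplitIdx cs net)) = 0 := by
  induction cs with
  | nil => intro _ _ h; exact absurd rfl h
  | cons ch rest ih =>
    intro net hb _
    simp only [pvSplitIdx]
    split
    · simp only [List.take_succ_cons, List.take_zero, pvPnet]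
      omega
    · rename_i hne
      rcases rest with _ | ⟨c2, r2⟩
      · exfalso
        simp only [pvPnet, add_zero] at hb
        exact hne (by omega)
      · have hb' : (net + pvPstep ch) + pvPnet (c2 :: r2) = 0 := by
          simp only [pvPnet] at hb ⊢; omega
        have h := ih (net + pvPstep ch) hb' (by simp)
        have ht : (ch :: c2 :: r2).take (1 + pvSplitIdx (c2 :: r2) (net + pvPstep ch))
            = ch :: (c2 :: r2).take (pvSplitIdx (c2 :: r2) (net + pvPstep ch)) := by
          rw [Nat.add_comm, List.take_succ_cons]
        rw [ht]
        simp only [pvPnet]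
        omega

theorem pvSplitIdx_min (cs : List Char) : ∀ net (j : Nat), 1 ≤ j → j < pvSplitIdx cs net →
    net + pvPnet (cs.take j) ≠ 0 := by
  induction cs with
  | nil => intro net j h1 h2; simp [pvSplitIdx] at h2
  | cons ch rest ih =>
    intro net j h1 h2
    simp only [pvSplitIdx] at h2
    split at h2
    · omega
    · rename_i hne
      rcases j with _ | k
      · omega
      rcases Nat.eq_zero_or_pos k with hk | hk
      · subst hk
        simpa [pvPnet] using hne
      · have h := ih (net + pvPstep ch) k hk (by omega)
        simp only [List.take_succ_cons, pvPnet]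
        omega

theorem pvOkIf (c : Int) (ok : Bool) :
    (if c - 1 < 0 then false else ok) = (ok && decide (0 ≤ c - 1)) := by
  by_cases hc : c - 1 < 0
  · simp only [if_pos hc, show ¬ (0 ≤ c - 1) by omega, decide_false, Bool.and_false]
  · simp only [if_neg hc, show (0 ≤ c - 1) by omega, decide_true, Bool.and_true]

theorem pvScanB_eq (cs : List Char) : ∀ (net c : Int) (ok : Bool) (i : Nat),
    pvScanB cs net c ok i =
      (i + pvSplitIdx cs net,
       c + pvCcnt (cs.take (pvSplitIdx cs net)),
       ok && pvOkFrom c (cs.take (pvSplitIdx cs net))) := by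
  induction cs with
  | nil => intro net c ok i; simp [pvScanB, pvSplitIdx, pvCcnt, pvOkFrom]
  | cons ch rest ih =>
    intro net c ok i
    simp only [pvScanB, pvSplitIdx]
    by_cases hch : ch = '('
    · rw [if_pos hch]
      have hp : pvPstep ch = 1 := by simp [pvPstep, hch]
      rw [hp]
      by_cases h0 : net + 1 = 0
      · simp only [if_pos h0]
        simp [List.take_succ_cons, pvCcnt, pvCstep, pvOkFrom, hch]
      · simp only [if_neg h0]
        rw [ih]
        have ht : (ch :: rest).take (1 + pvSplitIdx rest (net + 1))
            = ch :: rest.take (pvSplitIdx rest (net + 1)) := by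
          rw [Nat.add_comm, List.take_succ_cons]
        rw [ht]
        simp only [pvCcnt, pvCstep, pvOkFrom, if_pos hch, Prod.mk.injEq]
        exact ⟨by omega, by ring, trivial⟩
    · rw [if_neg hch]
      have hcond : (if ch = ')' then net - 1 else net) = net + pvPstep ch := by
        by_cases h2 : ch = ')' <;> simp [pvPstep, hch, h2] <;> ring
      rw [hcond]
      by_cases h0 : net + pvPstep ch = 0
      · simp only [if_pos h0]
        simp only [List.take_succ_cons, List.take_zero, pvCcnt, pvCstep, pvOkFrom,
          if_neg hch, Prod.mk.injEq]
        refine ⟨trivial, by ring, ?_⟩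
        rw [pvOkIf]
        simp
      · simp only [if_neg h0]
        rw [ih]
        have ht : (ch :: rest).take (1 + pvSplitIdx rest (net + pvPstep ch))
            = ch :: rest.take (pvSplitIdx rest (net + pvPstep ch)) := by
          rw [Nat.add_comm, List.take_succ_cons]
        rw [ht]
        simp only [pvCcnt, pvCstep, pvOkFrom, if_neg hch, Prod.mk.injEq]
        refine ⟨by omega, by ring, ?_⟩
        rw [pvOkIf, Bool.and_assoc]

theorem pvSepAux_of_min (cs : List Char) (m : Nat) (hmlen : m ≤ cs.length)
    (hhit : pvPnet (cs.take m) = 0)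
    (hmin : ∀ j, 1 ≤ j → j < m → pvPnet (cs.take j) ≠ 0) :
    ∀ k, 1 ≤ k → k ≤ m → pvSepAux cs k = some m := by
  intro k
  fun_induction pvSepAux cs k with
  | case1 k h => intro h1 h2; omega
  | case2 k h hbal =>
    intro h1 h2
    rcases Nat.lt_or_ge k m with hlt | hge
    · exact absurd ((pvBal_iff _).mp hbal) (hmin k h1 hlt)
    · have : k = m := by omega
      simp [this]
  | case3 k h hbal ih =>
    intro h1 h2
    rcases Nat.lt_or_ge k m with hlt | hge
    · exact ih (by omega) (by omega)
    · have : k = m := by omega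
      subst this
      exact absurd ((pvBal_iff _).mpr hhit) (by simp [hbal])

theorem pvGcpBloop_acc : ∀ (n : Nat) (s pre : List Char) (suf : List (List Char)),
    s.length ≤ n →
    pvGcpBloop s pre suf = pre ++ pvGcpBloop s [] [] ++ suf.reverse.flatten := by
  intro n
  induction n with
  | zero =>
    intro s pre suf hlen
    have : s = [] := by
      cases s with
      | nil => rfl
      | cons _ _ => simp at hlen
    subst this
    simp [pvGcpBloop]
  | succ n ih =>
    intro s pre suf hlen
    cases s with
    | nil => simp [pvGcpBloop]
    | cons ch rest =>
      rw [pvGcpBloop, pvGcpBloop]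
      have hvlen : ((ch :: rest).drop (pvScanB (ch :: rest) 0 0 true 0).1).length ≤ n := by
        have := pvScanB_fst_pos ch rest 0 0 true 0
        simp only [List.length_drop, List.length_cons] at *
        omega
      split
      · rw [ih _ _ _ hvlen]
        conv_rhs => rw [ih _ _ _ hvlen]
        simp
      · rw [ih _ _ _ hvlen]
        conv_rhs => rw [ih _ _ _ hvlen]
        simp

theorem pvBloop_step (ch : Char) (rest : List Char) :
    pvGcpBloop (ch :: rest) [] [] =
      (if pvIcA ((ch :: rest).take (pvSplitIdx (ch :: rest) 0)) = true then
        pvGcpBloop ((ch :: rest).drop (pvSplitIdx (ch :: rest) 0))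
          ((ch :: rest).take (pvSplitIdx (ch :: rest) 0)) []
      else
        pvGcpBloop ((ch :: rest).drop (pvSplitIdx (ch :: rest) 0)) ['(']
          [')' :: ((((ch :: rest).take (pvSplitIdx (ch :: rest) 0)).drop 1).dropLast).map
            (fun c => if c = '(' then ')' else '(')]) := by
  conv_lhs => rw [pvGcpBloop]
  rw [pvScanB_eq]
  rw [pvIcA_eq]
  simp only [Nat.zero_add, zero_add, Bool.true_and, List.nil_append]

theorem pvCstep_le_pvPstep (ch : Char) : pvCstep ch ≤ pvPstep ch := by
  unfold pvCstep pvPstep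
  split
  · simp
  · split <;> omega

theorem pvCcnt_le_pvPnet (cs : List Char) : pvCcnt cs ≤ pvPnet cs := by
  induction cs with
  | nil => simp [pvCcnt, pvPnet]
  | cons ch t ih =>
    have := pvCstep_le_pvPstep ch
    simp only [pvCcnt, pvPnet]
    omega

theorem pvOkFrom_nonneg (cs : List Char) : ∀ c : Int,
    pvOkFrom c cs = true → 0 ≤ c → 0 ≤ c + pvCcnt cs := by
  induction cs with
  | nil => intro c _ h; simpa [pvCcnt] using h
  | cons ch rest ih =>
    intro c hok hc
    simp only [pvOkFrom] at hok
    simp only [pvCcnt, pvCstep]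
    split at hok
    · have := ih (c + 1) hok (by omega)
      split <;> omega
    · rename_i hch
      rw [Bool.and_eq_true, decide_eq_true_eq] at hok
      have := ih (c - 1) hok.2 (by omega)
      rw [if_neg hch]
      omega

-- a balanced, already-correct string splits into a correct shortest balanced prefix and a correct rest
theorem pvCorrect_split (s : List Char) (hs : s ≠ []) (hb : pvPnet s = 0) (hc : pvIcA s = true) :
    pvIcA (s.take (pvSplitIdx s 0)) = true ∧ pvIcA (s.drop (pvSplitIdx s 0)) = true ∧
      pvPnet (s.drop (pvSplitIdx s 0)) = 0 := by
  have hsplit : s.take (pvSplitIdx s 0) ++ s.drop (pvSplitIdx s 0) = s :=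
    List.take_append_drop (pvSplitIdx s 0) s
  have hu0 : pvPnet (s.take (pvSplitIdx s 0)) = 0 := by
    have h := pvSplitIdx_hit s 0 (by omega) hs
    omega
  have hv0 : pvPnet (s.drop (pvSplitIdx s 0)) = 0 := by
    have h := pvPnet_append (s.take (pvSplitIdx s 0)) (s.drop (pvSplitIdx s 0))
    rw [hsplit] at h
    omega
  rw [pvIcA_eq, Bool.and_eq_true, beq_iff_eq] at hc
  obtain ⟨hok, hcc⟩ := hc
  rw [← hsplit, pvOkFrom_append, Bool.and_eq_true] at hok
  obtain ⟨hoku, hokv⟩ := hok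
  have hcu_le : pvCcnt (s.take (pvSplitIdx s 0)) ≤ 0 := by
    have h := pvCcnt_le_pvPnet (s.take (pvSplitIdx s 0))
    omega
  have hcu_ge : 0 ≤ (0 : Int) + pvCcnt (s.take (pvSplitIdx s 0)) :=
    pvOkFrom_nonneg _ 0 hoku le_rfl
  have hcu : pvCcnt (s.take (pvSplitIdx s 0)) = 0 := by omega
  have hcv : pvCcnt (s.drop (pvSplitIdx s 0)) = 0 := by
    have h := pvCcnt_append (s.take (pvSplitIdx s 0)) (s.drop (pvSplitIdx s 0))
    have h2 : pvCcnt s = 0 := by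
      rw [← hsplit] at hcc ⊢
      exact hcc
    rw [hsplit] at h
    omega
  refine ⟨?_, ?_, hv0⟩
  · rw [pvIcA_eq, hcu, hoku]
    rfl
  · rw [pvIcA_eq, hcv]
    rw [hcu, add_zero] at hokv
    rw [hokv]
    rfl

-- B's loop is the identity on balanced correct strings
theorem pvBloop_correct : ∀ (n : Nat) (s : List Char), s.length ≤ n →
    pvPnet s = 0 → pvIcA s = true → pvGcpBloop s [] [] = s := by
  intro n
  induction n with
  | zero =>
    intro s hlen _ _
    have : s = [] := by cases s with | nil => rfl | cons _ _ => simp at hlen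
    subst this
    simp [pvGcpBloop]
  | succ n ih =>
    intro s hlen hb hc
    cases s with
    | nil => simp [pvGcpBloop]
    | cons ch rest =>
      obtain ⟨hicu, hicv, hv0⟩ := pvCorrect_split (ch :: rest) (by simp) hb hc
      rw [pvBloop_step ch rest, if_pos hicu]
      have hvlen : ((ch :: rest).drop (pvSplitIdx (ch :: rest) 0)).length ≤ n := by
        have := pvSplitIdx_pos ch rest 0
        simp only [List.length_drop, List.length_cons] at *
        omega
      rw [pvGcpBloop_acc n _ _ _ hvlen, ih _ hvlen hv0 hicv]
      simp [List.take_append_drop]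

theorem pvFlipA_eq_map (cs : List Char) :
    pvFlipA cs = cs.map (fun c => if c = '(' then ')' else '(') := by
  induction cs with
  | nil => simp [pvFlipA]
  | cons ch t ih => simp [pvFlipA, ih]

-- main equivalence on balanced inputs
theorem pvMain : ∀ (n : Nat) (s : List Char), s.length ≤ n → pvPnet s = 0 →
    pvGcpA s = some (pvGcpBloop s [] []) := by
  intro n
  induction n with
  | zero =>
    intro s hlen _
    have : s = [] := by cases s with | nil => rfl | cons _ _ => simp at hlen
    subst this
    rw [pvGcpA]
    simp [pvBal, pvIcA, pvIcAux, pvGcpBloop]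
  | succ n ih =>
    intro s hlen hb
    cases s with
    | nil =>
      rw [pvGcpA]
      simp [pvBal, pvIcA, pvIcAux, pvGcpBloop]
    | cons ch rest =>
      have hbal : pvBal (ch :: rest) = true := (pvBal_iff _).mpr hb
      have hm1 : 1 ≤ pvSplitIdx (ch :: rest) 0 := pvSplitIdx_pos ch rest 0
      have hmlen : pvSplitIdx (ch :: rest) 0 ≤ (ch :: rest).length := pvSplitIdx_le _ 0
      have hu0 : pvPnet ((ch :: rest).take (pvSplitIdx (ch :: rest) 0)) = 0 := by
        have h := pvSplitIdx_hit (ch :: rest) 0 (by omega) (by simp)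
        omega
      have hv0 : pvPnet ((ch :: rest).drop (pvSplitIdx (ch :: rest) 0)) = 0 := by
        have h1 := pvPnet_append ((ch :: rest).take (pvSplitIdx (ch :: rest) 0))
          ((ch :: rest).drop (pvSplitIdx (ch :: rest) 0))
        rw [List.take_append_drop] at h1
        omega
      have hsep : pvSepAux (ch :: rest) 1 = some (pvSplitIdx (ch :: rest) 0) := by
        refine pvSepAux_of_min _ _ hmlen hu0 ?_ 1 le_rfl hm1
        intro j h1 h2
        have h := pvSplitIdx_min (ch :: rest) 0 j h1 h2
        omega
      have hvlen : ((ch :: rest).drop (pvSplitIdx (ch :: rest) 0)).length ≤ n := by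
        simp only [List.length_drop, List.length_cons] at *
        omega
      have ihv := ih _ hvlen hv0
      by_cases hc : pvIcA (ch :: rest) = true
      · rw [pvGcpA]
        simp only [hbal, Bool.not_true, Bool.false_eq_true, if_false, hc, if_true]
        rw [pvBloop_correct (n + 1) _ hlen hb hc]
      · rw [pvGcpA]
        simp only [hbal, Bool.not_true, Bool.false_eq_true, if_false]
        rw [if_neg hc]
        rw [dif_neg (show ¬ (ch :: rest).length = 0 by simp)]
        split
        · rename_i heq
          rw [hsep] at heq
          exact absurd heq (by simp)
        · rename_i i heq
          rw [hsep] at heq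
          have him : i = pvSplitIdx (ch :: rest) 0 := by
            injection heq with h'
            exact h'.symm
          subst him
          rw [pvBloop_step ch rest]
          by_cases hcu : pvIcA ((ch :: rest).take (pvSplitIdx (ch :: rest) 0)) = true
          · rw [if_pos hcu, if_pos hcu, ihv]
            conv_rhs => rw [pvGcpBloop_acc n _ _ _ hvlen]
            simp
          · rw [if_neg hcu, if_neg hcu, ihv]
            conv_rhs => rw [pvGcpBloop_acc n _ _ _ hvlen]
            simp [pvFlipA_eq_map]

-- ===== VERDICT (by name: the statement is the Claim_ definition above) =====
theorem get_correct_parentheses2_spec : Claim_equal_get_correct_parentheses2 := by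
  intro s _
  unfold Spec_get_correct_parentheses2 get_correct_parentheses2 get_correct_parentheses2_alt
  by_cases hb : pvPnet s.toList = 0
  · have hbal : pvBal s.toList = true := (pvBal_iff _).mpr hb
    rw [pvMain s.toList.length s.toList le_rfl hb]
    rw [if_pos (by simpa [pvBal] using hbal)]
    rfl
  · have hbal : pvBal s.toList = false := by
      rcases Bool.eq_false_or_eq_true (pvBal s.toList) with h | h
      · exact absurd ((pvBal_iff _).mp h) hb
      · exact h
    rw [pvGcpA]
    simp only [pvBal] at hbal
    simp [pvBal, hbal]
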